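-- pv_equiv track=rewrite | github.com/SergioLoboAlonso/TFM_SUPERVISOR_CARGAS | edge/src/data_normalizer.py | encode_alias
-- ===== SOURCE A (Python) =====
-- def encode_alias(alias_str: str) -> tuple[int, list]:
--     """
--     Codifica alias a formato Modbus (big-endian, 2B/reg).
--
--     Args:
--         alias_str: String alias (máx 64 caracteres ASCII)
--
--     Returns:
--         Tupla (longitud_bytes, lista_registros)
--     """
--     # Validar y truncar si excede límite
--     alias_bytes = alias_str.encode('ascii', errors='ignore')[:64]
--     alias_len = len(alias_bytes)
--
--     # Pad con 0x00 si longitud impar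
--     if alias_len % 2 != 0:
--         alias_bytes += b'\x00'
--
--     # Empaquetar en registros (MSB→LSB)
--     registers = []
--     for i in range(0, len(alias_bytes), 2):
--         msb = alias_bytes[i]
--         lsb = alias_bytes[i+1] if i+1 < len(alias_bytes) else 0x00
--         registers.append((msb << 8) | lsb)
--
--     return alias_len, registers
-- ===== SOURCE B (Python) =====
-- def encode_alias(alias_str: str) -> tuple[int, list]:
--     """Idiomatic re-implementation: pair even/odd byte slices with zip
--     instead of an index loop with shifts."""
--     alias_bytes = alias_str.encode('ascii', errors='ignore')[:64]
--     alias_len = len(alias_bytes)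
--     if alias_len % 2:
--         alias_bytes += b'\x00'
--     registers = [256 * msb + lsb
--                  for msb, lsb in zip(alias_bytes[::2], alias_bytes[1::2])]
--     return alias_len, registers
-- ===== Notes on version B (the rewrite author's own statement) =====
-- stated objective: idiomatic
-- what changed: Replaces the index loop over range(0,len,2) with shift-and-or register assembly by zipping the even and odd byte slices and combining each pair arithmetically (256*msb+lsb) in one comprehension.
import Mathlib
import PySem

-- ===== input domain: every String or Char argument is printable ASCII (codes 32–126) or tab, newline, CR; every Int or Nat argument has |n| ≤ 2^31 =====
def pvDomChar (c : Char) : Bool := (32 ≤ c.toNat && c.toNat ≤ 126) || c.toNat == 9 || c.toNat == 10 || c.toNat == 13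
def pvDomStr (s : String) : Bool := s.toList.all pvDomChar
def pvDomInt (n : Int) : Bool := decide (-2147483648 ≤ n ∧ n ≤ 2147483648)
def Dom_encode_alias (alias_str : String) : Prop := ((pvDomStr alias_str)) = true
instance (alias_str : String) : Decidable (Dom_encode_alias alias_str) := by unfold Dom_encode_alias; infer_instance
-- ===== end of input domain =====

-- B replaces A's index loop with shift/or register assembly by zipping the even and odd
-- byte slices and combining each pair as 256*msb+lsb (idiomatic; same O(n) cost).
-- ===== PORT A =====
-- encode('ascii', errors='ignore') keeps exactly the chars with code ≤ 127, as their codes;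
-- [:64] is PySem.List.slice; the << / | of the loop are Lean's <<< and PySem.Int.bor.
def encode_alias (alias_str : String) : Int × List Int :=
  let alias_bytes :=
    PySem.List.slice
      ((alias_str.toList.filter (fun c => c.toNat ≤ 127)).map (fun c => (c.toNat : Int)))
      none (some 64)
  let alias_len : Int := alias_bytes.length
  let alias_bytes :=
    if PySem.Int.mod alias_len 2 ≠ 0 then alias_bytes ++ [(0 : Int)] else alias_bytes
  let registers :=
    (PySem.List.pyRange 0 (alias_bytes.length : Int) 2).foldl
      (fun acc i =>
        acc ++ [PySem.Int.bor (PySem.List.pyGetD alias_bytes i 0 <<< (8 : Nat))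
                  (if i + 1 < (alias_bytes.length : Int) then PySem.List.pyGetD alias_bytes (i + 1) 0
                   else 0)])
      []
  (alias_len, registers)

-- ===== PORT B =====
-- xs[::2] has no PySem slice with a step, so it is ported by hand, exactly: every other
-- element starting at index 0; bs[1::2] is then pvStep2 bs.tail.
def pvStep2 : List Int → List Int
  | a :: _ :: rest => a :: pvStep2 rest
  | [a] => [a]
  | [] => []

def encode_alias_alt (alias_str : String) : Int × List Int :=
  let alias_bytes :=
    PySem.List.slice
      ((alias_str.toList.filter (fun c => c.toNat ≤ 127)).map (fun c => (c.toNat : Int)))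
      none (some 64)
  let alias_len : Int := alias_bytes.length
  let alias_bytes :=
    if PySem.Int.mod alias_len 2 ≠ 0 then alias_bytes ++ [(0 : Int)] else alias_bytes
  let registers :=
    List.zipWith (fun msb lsb => 256 * msb + lsb) (pvStep2 alias_bytes) (pvStep2 alias_bytes.tail)
  (alias_len, registers)

-- ===== PRECONDITION & SPEC =====
def Spec_encode_alias (alias_str : String) (out : Int × List Int) : Prop := out = encode_alias_alt alias_str
instance (alias_str : String) (out : Int × List Int) : Decidable (Spec_encode_alias alias_str out) := by unfold Spec_encode_alias; infer_instance

-- ===== CLAIM (what is proved, stated in full; the proofs are below) =====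
def Claim_equal_encode_alias : Prop := ∀ (alias_str : String), Dom_encode_alias alias_str → Spec_encode_alias alias_str (encode_alias alias_str)

-- ===== LEMMAS AND PROOFS =====

theorem pvStep2_cons (x : Int) (r : List Int) : pvStep2 (x :: r) = x :: pvStep2 r.tail := by
  cases r <;> simp [pvStep2]

theorem pv_bor_shift (a b : Int) (ha : 0 ≤ a) (hb0 : 0 ≤ b) (hb : b < 256) :
    PySem.Int.bor (a <<< (8 : Nat)) b = 256 * a + b := by
  obtain ⟨x, rfl⟩ := Int.eq_ofNat_of_zero_le ha
  obtain ⟨y, rfl⟩ := Int.eq_ofNat_of_zero_le hb0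
  have hy : y < 2 ^ 8 := by exact_mod_cast hb
  have h1 : ((x : Int)) <<< (8 : Nat) = ((x <<< 8 : Nat) : Int) := by
    simp [Nat.shiftLeft_eq, Int.shiftLeft_eq]
  rw [h1, PySem.Int.bor_natCast, ← Nat.shiftLeft_add_eq_or_of_lt hy]
  push_cast [Nat.shiftLeft_eq]; ring

-- the heart: the index-loop register list equals the zipped-slices register list,
-- for any even-length byte list whose entries are bytes
theorem pv_core (m : Nat) : ∀ (L : List Int), L.length = 2 * m →
    (∀ x ∈ L, 0 ≤ x ∧ x < 256) →
    (List.range m).map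
        (fun k => PySem.Int.bor ((L.getD (2 * k) 0) <<< (8 : Nat)) (L.getD (2 * k + 1) 0))
      = List.zipWith (fun msb lsb => 256 * msb + lsb) (pvStep2 L) (pvStep2 L.tail) := by
  induction m with
  | zero =>
      intro L hL _
      have : L = [] := List.eq_nil_of_length_eq_zero (by omega)
      subst this; simp [pvStep2]
  | succ m ih =>
      intro L hL hmem
      match L, hL with
      | a :: b :: rest, hL =>
        have hrest : rest.length = 2 * m := by
          simp only [List.length_cons] at hL; omega
        have ha := hmem a (by simp)
        have hb := hmem b (by simp)
        rw [List.range_succ_eq_map, List.map_cons, List.map_map]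
        rw [pvStep2_cons a]
        simp only [List.tail_cons]
        rw [pvStep2_cons b]
        simp only [List.zipWith_cons_cons]
        congr 1
        · show PySem.Int.bor (((a :: b :: rest).getD (2 * 0) 0) <<< (8 : Nat))
              ((a :: b :: rest).getD (2 * 0 + 1) 0) = 256 * a + b
          simp only [Nat.mul_zero, Nat.zero_add, List.getD_cons_zero, List.getD_cons_succ]
          exact pv_bor_shift a b ha.1 hb.1 hb.2
        · rw [← ih rest hrest (fun x hx => hmem x (by simp [hx]))]
          refine List.map_congr_left (fun k _ => ?_)
          have h1 : 2 * Nat.succ k = (2 * k + 1) + 1 := by omega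
          simp only [Function.comp, h1, List.getD_cons_succ]

set_option maxHeartbeats 1000000 in
theorem pv_main (s : String) : encode_alias s = encode_alias_alt s := by
  simp only [encode_alias, encode_alias_alt]
  set cs := PySem.List.slice
      ((s.toList.filter (fun c => c.toNat ≤ 127)).map (fun c => (c.toNat : Int)))
      none (some 64) with hcs
  have hmem0 : ∀ x ∈ cs, 0 ≤ x ∧ x < 256 := by
    intro x hx
    have hx' : x ∈ (s.toList.filter (fun c => c.toNat ≤ 127)).map (fun c => (c.toNat : Int)) := by
      have h64 : cs = ((s.toList.filter (fun c => c.toNat ≤ 127)).map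
          (fun c => (c.toNat : Int))).take 64 := by
        simpa using PySem.List.slice_to_natCast
          ((s.toList.filter (fun c => c.toNat ≤ 127)).map (fun c => (c.toNat : Int))) 64
      exact List.mem_of_mem_take (h64 ▸ hx)
    obtain ⟨c, hc, rfl⟩ := List.mem_map.mp hx'
    have := List.of_mem_filter hc
    constructor
    · positivity
    · have : c.toNat ≤ 127 := by simpa using this
      omega
  set bs := if PySem.Int.mod (cs.length : Int) 2 ≠ 0 then cs ++ [(0 : Int)] else cs with hbs
  have hmem : ∀ x ∈ bs, 0 ≤ x ∧ x < 256 := by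
    intro x hx
    rw [hbs] at hx
    split at hx
    · rcases List.mem_append.mp hx with h | h
      · exact hmem0 x h
      · simp at h; subst h; constructor <;> norm_num
    · exact hmem0 x hx
  have hmod : PySem.Int.mod (cs.length : Int) 2 = (cs.length : Int) % 2 :=
    PySem.Int.mod_eq_emod_of_pos (by norm_num)
  have heven : ∃ m, bs.length = 2 * m := by
    rw [hbs]; split
    · rename_i h; rw [hmod] at h
      refine ⟨(cs.length + 1) / 2, ?_⟩
      simp only [List.length_append, List.length_cons, List.length_nil]
      omega
    · rename_i h; rw [hmod] at h
      refine ⟨cs.length / 2, ?_⟩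
      omega
  obtain ⟨m, hm⟩ := heven
  congr 1
  rw [PySem.List.foldl_append_singleton_eq_map]
  rw [PySem.List.pyRange_of_pos 0 (bs.length : Int) (by norm_num)]
  have hcnt : (if (0:Int) < (bs.length : Int)
      then (((bs.length : Int) - 0 + 2 - 1) / 2).toNat else 0) = m := by
    split <;> omega
  rw [hcnt, List.map_map]
  rw [← pv_core m bs hm hmem]
  refine List.map_congr_left (fun k hk => ?_)
  have hkm : k < m := List.mem_range.mp hk
  simp only [Function.comp]
  have e1 : (0 : Int) + 2 * (k : Int) = ((2 * k : Nat) : Int) := by push_cast; ring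
  have e2 : ((2 * k : Nat) : Int) + 1 = ((2 * k + 1 : Nat) : Int) := by push_cast; ring
  have hguard : (((2 * k : Nat) : Int) + 1 < (bs.length : Int)) := by
    rw [hm]; push_cast; omega
  rw [e1, if_pos hguard, e2]
  simp only [PySem.List.pyGetD_natCast]

-- ===== VERDICT (by name: the statement is the Claim_ definition above) =====
theorem encode_alias_spec : Claim_equal_encode_alias := by
  intro s _
  unfold Spec_encode_alias
  exact pv_main s
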